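-- pv_equiv track=rewrite | github.com/RuellePaul/facebook-coding-puzzles | Level 2 - Rotary Lock (Chapter 2)/solution.py | getMinCodeEntryTime
-- ===== SOURCE A (Python) =====
-- from typing import List
--
-- def getMinimalPathLength(N, start, end):
--     direct_path_length = abs(end - start)
--     return min(direct_path_length, N - direct_path_length)
--
-- def getMinCodeEntryTime(N: int, M: int, C: List[int]) -> int:
--     tree = {
--         (C[0], 1): getMinimalPathLength(N, C[0], 1)
--     }
--
--     for digit in C[1:]:
--
--         next_tree = {}
--
--         for state in tree.keys():
--             left_state = (digit, state[1])
--             left_movement = getMinimalPathLength(N, digit, state[0])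
--             if left_state in next_tree:
--                 next_tree[left_state] = min(tree[state] + left_movement, next_tree[left_state])
--             else:
--                 next_tree[left_state] = left_movement + tree[state]
--
--             right_state = (state[0], digit)
--             right_movement = getMinimalPathLength(N, digit, state[1])
--             if right_state in next_tree:
--                 next_tree[right_state] = min(tree[state] + right_movement, next_tree[right_state])
--             else:
--                 next_tree[right_state] = right_movement + tree[state]
--
--         tree = next_tree
--
--     return min(tree.values())
-- ===== SOURCE B (Python) =====
-- from typing import List
--
-- def getMinimalPathLength(N, start, end):
--     direct_path_length = abs(end - start)
--     return min(direct_path_length, N - direct_path_length)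
--
-- def getMinCodeEntryTime(N: int, M: int, C: List[int]) -> int:
--     # Backward cost-to-go DP over rows indexed by the idle dial's position.
--     # Row for suffix C[i:]: entries (p, cost to finish C[i:] with the active dial
--     # on C[i-1] and the idle dial on p), p ranging over [1] + C[:i].  Processing
--     # the digit pairs (C[i-1], C[i]) back-to-front shrinks the row by one each
--     # step; the last entry of the old row is the cost with the idle dial on
--     # C[i-1], i.e. the cost after swapping roles of the dials.
--     g = [(p, 0) for p in [1] + C[:-1]]
--     for pd, d in reversed(list(zip(C, C[1:]))):
--         a = getMinimalPathLength(N, pd, d)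
--         ci = g[-1][1]
--         g = [(p, min(a + c, getMinimalPathLength(N, p, d) + ci)) for p, c in g[:-1]]
--     return getMinimalPathLength(N, 1, C[0]) + g[0][1]
-- ===== Notes on version B (the rewrite author's own statement) =====
-- stated objective: faster
-- what changed: A runs a forward dict DP whose states are ordered pairs of both dial positions accumulating cost-so-far and takes a final min; B computes cost-to-go backward over the digit pairs with a plain shrinking list row keyed by the idle dial's position (no dicts, no pair states, no final min scan).
-- outside the precondition, e.g. on getMinCodeEntryTime(5, 0, []): A raises IndexError, B raises IndexError
import Mathlib
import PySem

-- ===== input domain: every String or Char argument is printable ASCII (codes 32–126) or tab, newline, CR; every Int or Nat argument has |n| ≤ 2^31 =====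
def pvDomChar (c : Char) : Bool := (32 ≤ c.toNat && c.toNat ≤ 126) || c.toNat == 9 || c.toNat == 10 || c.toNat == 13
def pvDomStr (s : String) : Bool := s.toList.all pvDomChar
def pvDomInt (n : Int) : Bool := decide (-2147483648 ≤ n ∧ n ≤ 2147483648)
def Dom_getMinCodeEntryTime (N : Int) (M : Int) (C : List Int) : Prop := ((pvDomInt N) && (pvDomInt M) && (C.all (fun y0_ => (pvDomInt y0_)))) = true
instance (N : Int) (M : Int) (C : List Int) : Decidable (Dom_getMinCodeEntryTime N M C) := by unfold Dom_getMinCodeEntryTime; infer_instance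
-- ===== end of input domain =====

-- B replaces A's forward dict DP over ordered pair-of-dial states (cost-so-far, final min
-- over all states) by a backward cost-to-go DP: one shrinking list row per digit, keyed by
-- the idle dial's position.

-- ===== PORT A =====
def getMinimalPathLength (N start «end» : Int) : Int :=
  let direct_path_length := |«end» - start|
  min direct_path_length (N - direct_path_length)

def getMinCodeEntryTime (N : Int) (M : Int) (C : List Int) : Int :=
  match C with
  | [] => 0   -- Python raises IndexError here (C[0]); excluded by Pre_
  | c0 :: rest =>
    let tree0 : PySem.Dict (Int × Int) Int :=
      PySem.Dict.empty.insert (c0, 1) (getMinimalPathLength N c0 1)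
    let tree := rest.foldl (fun tree digit =>
      -- 'for state in tree.keys(): … tree[state]' iterated as the (key, value) items
      tree.items.foldl (fun nt sc =>
        let state := sc.1
        let c := sc.2
        let leftState := (digit, state.2)
        let leftMovement := getMinimalPathLength N digit state.1
        let nt :=
          match nt.get? leftState with
          | some v => nt.insert leftState (min (c + leftMovement) v)
          | none => nt.insert leftState (leftMovement + c)
        let rightState := (state.1, digit)
        let rightMovement := getMinimalPathLength N digit state.2
        match nt.get? rightState with
        | some v => nt.insert rightState (min (c + rightMovement) v)
        | none => nt.insert rightState (rightMovement + c)) PySem.Dict.empty) tree0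
    (PySem.List.min? tree.values (fun x => x)).getD 0

-- ===== PORT B =====
-- the row-update comprehension of Source B's loop body, named as a helper
def pvStepRow (N : Int) (g : List (Int × Int)) (pdd : Int × Int) : List (Int × Int) :=
  let a := getMinimalPathLength N pdd.1 pdd.2
  let ci := ((PySem.List.pyGet? g (-1)).getD (0, 0)).2   -- g[-1][1]; g is provably nonempty here
  (PySem.List.slice g none (some (-1))).map
    (fun pc => (pc.1, min (a + pc.2) (getMinimalPathLength N pc.1 pdd.2 + ci)))

def getMinCodeEntryTime_alt (N : Int) (M : Int) (C : List Int) : Int :=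
  match C with
  | [] => 0   -- Python raises IndexError here (C[0]); excluded by Pre_
  | c0 :: _ =>
    let g0 := (1 :: PySem.List.slice C none (some (-1))).map (fun p => (p, (0 : Int)))
    let g := ((C.zip (PySem.List.slice C (some 1) none)).reverse).foldl (pvStepRow N) g0
    getMinimalPathLength N 1 c0 + ((PySem.List.pyGet? g 0).getD (0, 0)).2

-- ===== PRECONDITION & SPEC =====
-- Pre_ excludes only C = [], on which the Python A raises IndexError at C[0].
def Pre_getMinCodeEntryTime (N : Int) (M : Int) (C : List Int) : Prop := C ≠ []
instance (N : Int) (M : Int) (C : List Int) : Decidable (Pre_getMinCodeEntryTime N M C) := by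
  unfold Pre_getMinCodeEntryTime; infer_instance
def pvWitness_getMinCodeEntryTime : Int × Int × List Int := (5, 2, [3, 2])

def Spec_getMinCodeEntryTime (N : Int) (M : Int) (C : List Int) (out : Int) : Prop := out = getMinCodeEntryTime_alt N M C
instance (N : Int) (M : Int) (C : List Int) (out : Int) : Decidable (Spec_getMinCodeEntryTime N M C out) := by unfold Spec_getMinCodeEntryTime; infer_instance

-- ===== CLAIM (what is proved, stated in full; the proofs are below) =====
def Claim_equal_getMinCodeEntryTime : Prop := ∀ (N : Int) (M : Int) (C : List Int), Dom_getMinCodeEntryTime N M C → Pre_getMinCodeEntryTime N M C → Spec_getMinCodeEntryTime N M C (getMinCodeEntryTime N M C)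

-- ===== LEMMAS AND PROOFS =====

theorem pvDist_symm (N a b : Int) : getMinimalPathLength N a b = getMinimalPathLength N b a := by
  simp [getMinimalPathLength, abs_sub_comm]

/-- cost-to-go: minimal time to enter the remaining digits, active dial on `prev`,
    idle dial on `other` (the common semantic both programs compute) -/
def pvG (N prev other : Int) : List Int → Int
  | [] => 0
  | d :: r => min (getMinimalPathLength N prev d + pvG N d other r)
                  (getMinimalPathLength N other d + pvG N d prev r)

/-- the idle dial's position in one of A's pair states, given the active dial is on p -/
def pvOth (p : Int) (k : Int × Int) : Int := if k.1 = p then k.2 else k.1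

theorem pvOth_fst (p r : Int) : pvOth p (p, r) = r := by simp [pvOth]
theorem pvOth_snd (p l : Int) : pvOth p (l, p) = l := by
  by_cases h : l = p <;> simp [pvOth, h]

/-- insert-with-min, the merge A's loop body performs per produced key -/
def pvMinIns {κ : Type} [BEq κ] (d : PySem.Dict κ Int) (k : κ) (v : Int) : PySem.Dict κ Int :=
  match d.get? k with
  | some w => d.insert k (min v w)
  | none => d.insert k v

def pvFMI {κ : Type} [BEq κ] (d0 : PySem.Dict κ Int) (L : List (κ × Int)) : PySem.Dict κ Int :=
  L.foldl (fun d p => pvMinIns d p.1 p.2) d0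

def pvOmin (a : Option Int) (v : Int) : Option Int :=
  some (match a with | some w => min w v | none => v)

def pvPfold {κ : Type} (L : List (κ × Int)) (P : κ → Prop) [DecidablePred P] (a : Option Int) : Option Int :=
  L.foldl (fun a p => if P p.1 then pvOmin a p.2 else a) a

/-- min of `w` over a list, as an Option (none on []) -/
def pvMinW {α : Type} (w : α → Int) (L : List α) : Option Int :=
  L.foldl (fun a x => pvOmin a (w x)) none

def pvExpandA (N d : Int) (L : List ((Int × Int) × Int)) : List ((Int × Int) × Int) :=
  L.flatMap (fun sc =>
    [((d, sc.1.2), sc.2 + getMinimalPathLength N d sc.1.1),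
     ((sc.1.1, d), sc.2 + getMinimalPathLength N d sc.1.2)])

def pvStepA (N d : Int) (T : PySem.Dict (Int × Int) Int) : PySem.Dict (Int × Int) Int :=
  pvFMI PySem.Dict.empty (pvExpandA N d T.items)

/-- A's reachable states always carry the just-entered digit on one dial -/
def pvShape (p : Int) (T : PySem.Dict (Int × Int) Int) : Prop :=
  T.keys.Nodup ∧ ∀ k : Int × Int, T.get? k ≠ none → k.1 = p ∨ k.2 = p

theorem pvMinIns_eq_insert {κ : Type} [BEq κ] (d : PySem.Dict κ Int) (k : κ) (v : Int) :
    pvMinIns d k v = d.insert k (match d.get? k with | some w => min v w | none => v) := by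
  unfold pvMinIns; cases d.get? k <;> rfl

theorem pvGet?_pvMinIns {κ : Type} [BEq κ] [LawfulBEq κ] [DecidableEq κ]
    (d : PySem.Dict κ Int) (k k' : κ) (v : Int) :
    (pvMinIns d k v).get? k' = if k' = k then pvOmin (d.get? k) v else d.get? k' := by
  unfold pvMinIns
  cases h : d.get? k <;> simp [PySem.Dict.get?_insert, pvOmin, min_comm]

theorem pvGet?_pvFMI {κ : Type} [BEq κ] [LawfulBEq κ] [DecidableEq κ]
    (L : List (κ × Int)) (d0 : PySem.Dict κ Int) (k : κ) :
    (pvFMI d0 L).get? k = pvPfold L (fun x => x = k) (d0.get? k) := by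
  induction L generalizing d0 with
  | nil => rfl
  | cons p L ih =>
    simp only [pvFMI, List.foldl_cons, pvPfold] at *
    rw [ih, pvGet?_pvMinIns]
    by_cases h : k = p.1
    · subst h; simp
    · rw [if_neg h, if_neg (fun hh => h hh.symm)]

theorem pvNodup_pvFMI {κ : Type} [BEq κ] [LawfulBEq κ]
    (L : List (κ × Int)) (d0 : PySem.Dict κ Int) (h : d0.keys.Nodup) :
    (pvFMI d0 L).keys.Nodup := by
  have e : pvFMI d0 L = L.foldl
      (fun d x => d.insert x.1 (match d.get? x.1 with | some w => min x.2 w | none => x.2)) d0 := by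
    unfold pvFMI
    refine PySem.List.foldl_congr_mem _ _ _ _ (fun acc x hx => ?_)
    rw [pvMinIns_eq_insert]
  rw [e]
  exact PySem.Dict.nodup_keys_foldl_insert_key L Prod.fst _ d0 h

theorem pvPfold_none_iff {κ : Type} (L : List (κ × Int)) (P : κ → Prop) [DecidablePred P]
    (a : Option Int) : pvPfold L P a = none ↔ (a = none ∧ ∀ p ∈ L, ¬ P p.1) := by
  induction L generalizing a with
  | nil => simp [pvPfold]
  | cons p L ih =>
    simp only [pvPfold, List.foldl_cons] at *
    by_cases h : P p.1
    · simp only [h, if_pos]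
      rw [ih]
      simp [pvOmin, h]
    · simp only [h, if_neg, not_false_iff]
      rw [ih]
      simp [h]

theorem pvPfold_le {κ : Type} (L : List (κ × Int)) (P : κ → Prop) [DecidablePred P] :
    ∀ (a : Option Int) (m : Int), pvPfold L P a = some m →
      (∀ p ∈ L, P p.1 → m ≤ p.2) ∧ (∀ w, a = some w → m ≤ w) := by
  induction L with
  | nil =>
    intro a m h
    simp only [pvPfold, List.foldl_nil] at h
    exact ⟨by simp, by intro w hw; rw [hw] at h; injection h with h; omega⟩
  | cons p L ih =>
    intro a m h
    simp only [pvPfold, List.foldl_cons] at h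
    by_cases hp : P p.1
    · rw [if_pos hp] at h
      obtain ⟨h1, h2⟩ := ih _ m h
      have hm : ∀ w, pvOmin a p.2 = some w → m ≤ w := h2
      have hle2 : m ≤ p.2 := by
        cases a with
        | none => exact hm p.2 rfl
        | some w =>
          have := hm (min w p.2) rfl
          omega
      refine ⟨?_, ?_⟩
      · intro q hq hPq
        rcases List.mem_cons.mp hq with hq | hq
        · subst hq; exact hle2
        · exact h1 q hq hPq
      · intro w hw
        subst hw
        have := hm (min w p.2) rfl
        omega
    · rw [if_neg hp] at h
      obtain ⟨h1, h2⟩ := ih _ m h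
      refine ⟨?_, h2⟩
      intro q hq hPq
      rcases List.mem_cons.mp hq with hq | hq
      · subst hq; exact absurd hPq hp
      · exact h1 q hq hPq

theorem pvPfold_attain {κ : Type} (L : List (κ × Int)) (P : κ → Prop) [DecidablePred P] :
    ∀ (a : Option Int) (m : Int), pvPfold L P a = some m →
      (∃ p ∈ L, P p.1 ∧ p.2 = m) ∨ a = some m := by
  induction L with
  | nil => intro a m h; exact Or.inr h
  | cons p L ih =>
    intro a m h
    simp only [pvPfold, List.foldl_cons] at h
    by_cases hp : P p.1
    · rw [if_pos hp] at h
      rcases ih _ m h with ⟨q, hq, hPq, hv⟩ | ha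
      · exact Or.inl ⟨q, List.mem_cons_of_mem _ hq, hPq, hv⟩
      · cases a with
        | none =>
          simp [pvOmin] at ha
          exact Or.inl ⟨p, List.mem_cons_self .., hp, by omega⟩
        | some w =>
          simp only [pvOmin] at ha
          injection ha with ha
          rcases min_choice w p.2 with hc | hc
          · exact Or.inr (by rw [← ha, hc])
          · exact Or.inl ⟨p, List.mem_cons_self .., hp, by omega⟩
    · rw [if_neg hp] at h
      rcases ih _ m h with ⟨q, hq, hPq, hv⟩ | ha
      · exact Or.inl ⟨q, List.mem_cons_of_mem _ hq, hPq, hv⟩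
      · exact Or.inr ha

theorem pvPfold_isSome {κ : Type} (L : List (κ × Int)) (P : κ → Prop) [DecidablePred P]
    (a : Option Int) (p : κ × Int) (hp : p ∈ L) (hP : P p.1) : (pvPfold L P a).isSome := by
  cases h : pvPfold L P a with
  | some m => rfl
  | none =>
    rw [pvPfold_none_iff] at h
    exact absurd hP (h.2 p hp)

-- ----- pvMinW toolbox -----

theorem pvMinW_none_iff {α : Type} (w : α → Int) (L : List α) :
    ∀ a : Option Int, L.foldl (fun a x => pvOmin a (w x)) a = none ↔ (a = none ∧ L = []) := by
  induction L with
  | nil => intro a; simp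
  | cons x L ih =>
    intro a
    simp only [List.foldl_cons]
    rw [ih]
    simp [pvOmin]

theorem pvMinW_le {α : Type} (w : α → Int) (L : List α) :
    ∀ (a : Option Int) (m : Int), L.foldl (fun a x => pvOmin a (w x)) a = some m →
      (∀ x ∈ L, m ≤ w x) ∧ (∀ v, a = some v → m ≤ v) := by
  induction L with
  | nil =>
    intro a m h
    simp only [List.foldl_nil] at h
    exact ⟨by simp, by intro v hv; rw [hv] at h; injection h with h; omega⟩
  | cons x L ih =>
    intro a m h
    simp only [List.foldl_cons] at h
    obtain ⟨h1, h2⟩ := ih _ m h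
    have hle : m ≤ w x := by
      cases a with
      | none => exact h2 (w x) rfl
      | some v => have := h2 (min v (w x)) rfl; omega
    refine ⟨?_, ?_⟩
    · intro y hy
      rcases List.mem_cons.mp hy with hy | hy
      · subst hy; exact hle
      · exact h1 y hy
    · intro v hv
      subst hv
      have := h2 (min v (w x)) rfl
      omega

theorem pvMinW_attain {α : Type} (w : α → Int) (L : List α) :
    ∀ (a : Option Int) (m : Int), L.foldl (fun a x => pvOmin a (w x)) a = some m →
      (∃ x ∈ L, w x = m) ∨ a = some m := by
  induction L with
  | nil => intro a m h; exact Or.inr h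
  | cons x L ih =>
    intro a m h
    simp only [List.foldl_cons] at h
    rcases ih _ m h with ⟨y, hy, hv⟩ | ha
    · exact Or.inl ⟨y, List.mem_cons_of_mem _ hy, hv⟩
    · cases a with
      | none =>
        simp [pvOmin] at ha
        exact Or.inl ⟨x, List.mem_cons_self .., ha⟩
      | some v =>
        simp only [pvOmin] at ha
        injection ha with ha
        rcases min_choice v (w x) with hc | hc
        · exact Or.inr (by rw [← ha, hc])
        · exact Or.inl ⟨x, List.mem_cons_self .., by omega⟩

theorem pvMinW_congr {α : Type} (w1 w2 : α → Int) (L : List α)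
    (h : ∀ x ∈ L, w1 x = w2 x) : pvMinW w1 L = pvMinW w2 L := by
  unfold pvMinW
  exact PySem.List.foldl_congr_mem _ _ _ _ (fun acc x hx => by rw [h x hx])

theorem pvMinW_eq_of_dom {α β : Type} (w1 : α → Int) (w2 : β → Int) (L1 : List α) (L2 : List β)
    (h12 : ∀ x ∈ L1, ∃ y ∈ L2, w2 y ≤ w1 x)
    (h21 : ∀ y ∈ L2, ∃ x ∈ L1, w1 x ≤ w2 y) :
    pvMinW w1 L1 = pvMinW w2 L2 := by
  cases h1 : pvMinW w1 L1 with
  | none =>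
    rw [pvMinW] at h1
    rw [pvMinW_none_iff] at h1
    cases h2 : pvMinW w2 L2 with
    | none => rfl
    | some m2 =>
      rcases pvMinW_attain w2 L2 none m2 h2 with ⟨y, hy, _⟩ | h
      · obtain ⟨x, hx, _⟩ := h21 y hy
        rw [h1.2] at hx
        exact absurd hx (List.not_mem_nil)
      · exact absurd h (by simp)
  | some m1 =>
    cases h2 : pvMinW w2 L2 with
    | none =>
      rw [pvMinW] at h2
      rw [pvMinW_none_iff] at h2
      rcases pvMinW_attain w1 L1 none m1 h1 with ⟨x, hx, _⟩ | h
      · obtain ⟨y, hy, _⟩ := h12 x hx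
        rw [h2.2] at hy
        exact absurd hy (List.not_mem_nil)
      · exact absurd h (by simp)
    | some m2 =>
      congr 1
      have hle21 : m2 ≤ m1 := by
        rcases pvMinW_attain w1 L1 none m1 h1 with ⟨x, hx, hv⟩ | h
        · obtain ⟨y, hy, hle⟩ := h12 x hx
          have := (pvMinW_le w2 L2 none m2 h2).1 y hy
          omega
        · exact absurd h (by simp)
      have hle12 : m1 ≤ m2 := by
        rcases pvMinW_attain w2 L2 none m2 h2 with ⟨y, hy, hv⟩ | h
        · obtain ⟨x, hx, hle⟩ := h21 y hy
          have := (pvMinW_le w1 L1 none m1 h1).1 x hx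
          omega
        · exact absurd h (by simp)
      omega

theorem pvOmin_omin (a : Option Int) (u v : Int) :
    pvOmin (pvOmin a u) v = pvOmin a (min u v) := by
  cases a <;> simp [pvOmin, min_assoc]

theorem pvMinW_flatMap_pair {α β : Type} (f g : α → β) (w : β → Int) (L : List α) :
    pvMinW w (L.flatMap (fun x => [f x, g x])) = pvMinW (fun x => min (w (f x)) (w (g x))) L := by
  unfold pvMinW
  suffices h : ∀ a : Option Int,
      (L.flatMap (fun x => [f x, g x])).foldl (fun a x => pvOmin a (w x)) a =
        L.foldl (fun a x => pvOmin a (min (w (f x)) (w (g x)))) a from h none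
  induction L with
  | nil => intro a; rfl
  | cons x L ih =>
    intro a
    simp only [List.flatMap_cons, List.foldl_append, List.foldl_cons, List.foldl_nil]
    rw [pvOmin_omin, ih]

theorem pvMinW_map {α β : Type} (f : α → β) (w : β → Int) (L : List α) :
    pvMinW w (L.map f) = pvMinW (fun x => w (f x)) L := by
  simp [pvMinW, List.foldl_map]

theorem pvMinW_pvFMI (E : List ((Int × Int) × Int)) (u : Int × Int → Int) :
    pvMinW (fun kc => kc.2 + u kc.1) (pvFMI PySem.Dict.empty E).items =
      pvMinW (fun kc => kc.2 + u kc.1) E := by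
  have hnd : (pvFMI (PySem.Dict.empty : PySem.Dict (Int × Int) Int) E).keys.Nodup :=
    pvNodup_pvFMI _ _ PySem.Dict.nodup_keys_empty
  refine pvMinW_eq_of_dom _ _ _ _ ?_ ?_
  · intro kc hkc
    have hget : (pvFMI PySem.Dict.empty E).get? kc.1 = some kc.2 :=
      PySem.Dict.get?_of_mem_items _ hkc hnd
    rw [pvGet?_pvFMI, PySem.Dict.get?_empty] at hget
    rcases pvPfold_attain E _ none kc.2 hget with ⟨e, he, hPe, hv⟩ | h
    · exact ⟨e, he, by simp [hPe, hv]⟩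
    · exact absurd h (by simp)
  · intro e he
    have hs : ((pvFMI (PySem.Dict.empty : PySem.Dict (Int × Int) Int) E).get? e.1).isSome := by
      rw [pvGet?_pvFMI, PySem.Dict.get?_empty]
      exact pvPfold_isSome E _ none e he rfl
    cases hg : (pvFMI (PySem.Dict.empty : PySem.Dict (Int × Int) Int) E).get? e.1 with
    | none => rw [hg] at hs; simp at hs
    | some c =>
      have hc : c ≤ e.2 := by
        have := hg
        rw [pvGet?_pvFMI, PySem.Dict.get?_empty] at this
        exact (pvPfold_le E _ none c this).1 e he rfl
      exact ⟨(e.1, c), PySem.Dict.mem_items_of_get?_eq_some _ hg, by simp; omega⟩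

theorem pvMin?_eq_pvMinW (V : List Int) :
    PySem.List.min? V (fun x => x) = pvMinW (fun x => x) V := by
  cases h1 : PySem.List.min? V (fun x => x) with
  | none =>
    have hV : V = [] := (PySem.List.min?_eq_none_iff _ _).mp h1
    subst hV; rfl
  | some m1 =>
    have hmem := PySem.List.min?_mem h1
    cases h2 : pvMinW (fun x => x) V with
    | none =>
      rw [pvMinW, pvMinW_none_iff] at h2
      rw [h2.2] at hmem
      exact absurd hmem (List.not_mem_nil)
    | some m2 =>
      congr 1
      have h21 : m2 ≤ m1 := (pvMinW_le _ V none m2 h2).1 m1 hmem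
      have h12 : m1 ≤ m2 := by
        rcases pvMinW_attain _ V none m2 h2 with ⟨y, hy, hv⟩ | h
        · have := PySem.List.min?_isMin h1 y hy
          simp only at this
          omega
        · exact absurd h (by simp)
      omega

-- ----- A-side invariant and weighted-min step -----

theorem pvShape_step (N prev d : Int) (T : PySem.Dict (Int × Int) Int)
    (h : pvShape prev T) : pvShape d (pvStepA N d T) := by
  refine ⟨pvNodup_pvFMI _ _ PySem.Dict.nodup_keys_empty, ?_⟩
  intro k hk
  rw [pvStepA, pvGet?_pvFMI] at hk
  rcases hq : pvPfold (pvExpandA N d T.items) (fun x => x = k) (PySem.Dict.empty.get? k) with _ | m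
  · rw [PySem.Dict.get?_empty] at hk hq; exact absurd hq hk
  · rw [PySem.Dict.get?_empty] at hq
    rcases pvPfold_attain _ _ none m hq with ⟨q, hq2, hPq, _⟩ | hcon
    · simp only [pvExpandA, List.mem_flatMap] at hq2
      obtain ⟨sc, _, hsc⟩ := hq2
      simp only [List.mem_cons] at hsc
      rcases hsc with hsc | hsc | hsc
      · subst hsc; simp at hPq; rw [← hPq]; left; rfl
      · subst hsc; simp at hPq; rw [← hPq]; right; rfl
      · exact absurd hsc (by simp)
    · exact absurd hcon (by simp)

theorem pvStepW (N prev d : Int) (rest : List Int) (T : PySem.Dict (Int × Int) Int)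
    (h : pvShape prev T) :
    pvMinW (fun kc => kc.2 + pvG N d (pvOth d kc.1) rest) (pvStepA N d T).items =
      pvMinW (fun kc => kc.2 + pvG N prev (pvOth prev kc.1) (d :: rest)) T.items := by
  rw [pvStepA, pvMinW_pvFMI (pvExpandA N d T.items) (fun k => pvG N d (pvOth d k) rest)]
  unfold pvExpandA
  have hh := pvMinW_flatMap_pair
    (fun sc : (Int × Int) × Int => ((d, sc.1.2), sc.2 + getMinimalPathLength N d sc.1.1))
    (fun sc : (Int × Int) × Int => ((sc.1.1, d), sc.2 + getMinimalPathLength N d sc.1.2))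
    (fun kc : (Int × Int) × Int => kc.2 + pvG N d (pvOth d kc.1) rest) T.items
  beta_reduce at hh
  rw [hh]
  refine pvMinW_congr _ _ _ (fun sc hsc => ?_)
  obtain ⟨⟨l, r⟩, c⟩ := sc
  have hget : T.get? (l, r) = some c := PySem.Dict.get?_of_mem_items _ hsc h.1
  have hlr : l = prev ∨ r = prev := h.2 (l, r) (by rw [hget]; simp)
  simp only [pvOth_fst, pvOth_snd]
  by_cases hl : l = prev
  · subst hl
    rw [pvOth_fst]
    simp only [pvG]
    rw [pvDist_symm N d l, pvDist_symm N d r]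
    omega
  · have hr : r = prev := hlr.resolve_left hl
    subst hr
    rw [show pvOth r (l, r) = l from by simp [pvOth, hl]]
    simp only [pvG]
    rw [pvDist_symm N d l, pvDist_symm N d r]
    omega

theorem pvLoopW (N : Int) (ds : List Int) :
    ∀ (prev : Int) (T : PySem.Dict (Int × Int) Int), pvShape prev T →
      pvMinW (fun kc : (Int × Int) × Int => kc.2)
          ((ds.foldl (fun T d => pvStepA N d T) T)).items =
        pvMinW (fun kc => kc.2 + pvG N prev (pvOth prev kc.1) ds) T.items := by
  induction ds with
  | nil =>
    intro prev T _
    exact (pvMinW_congr _ _ _ (fun kc _ => by simp [pvG])).symm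
  | cons d ds ih =>
    intro prev T h
    rw [List.foldl_cons, ih d (pvStepA N d T) (pvShape_step N prev d T h), pvStepW N prev d ds T h]

-- rewrite port A's inner loop to pvStepA
def pvFMI2 {κ α : Type} [BEq κ] (L : List α) (k1 k2 : α → κ) (v1 v2 : α → Int)
    (acc : PySem.Dict κ Int) : PySem.Dict κ Int :=
  L.foldl (fun d x => pvMinIns (pvMinIns d (k1 x) (v1 x)) (k2 x) (v2 x)) acc

theorem pvFoldlTwo {κ α : Type} [BEq κ] (L : List α) (k1 k2 : α → κ) (v1 v2 : α → Int) :
    ∀ acc, pvFMI2 L k1 k2 v1 v2 acc =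
      pvFMI acc (L.flatMap (fun x => [(k1 x, v1 x), (k2 x, v2 x)])) := by
  induction L with
  | nil => intro acc; rfl
  | cons x L ih =>
    intro acc
    rw [pvFMI2, List.foldl_cons, show pvFMI acc ((x :: L).flatMap
        (fun x => [(k1 x, v1 x), (k2 x, v2 x)])) =
      pvFMI (pvMinIns (pvMinIns acc (k1 x) (v1 x)) (k2 x) (v2 x))
        (L.flatMap (fun x => [(k1 x, v1 x), (k2 x, v2 x)])) from rfl]
    exact ih _

theorem pvBodyA (N digit : Int) (tree : PySem.Dict (Int × Int) Int) :
    tree.items.foldl (fun nt sc =>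
      let state := sc.1
      let c := sc.2
      let leftState := (digit, state.2)
      let leftMovement := getMinimalPathLength N digit state.1
      let nt :=
        match nt.get? leftState with
        | some v => nt.insert leftState (min (c + leftMovement) v)
        | none => nt.insert leftState (leftMovement + c)
      let rightState := (state.1, digit)
      let rightMovement := getMinimalPathLength N digit state.2
      match nt.get? rightState with
      | some v => nt.insert rightState (min (c + rightMovement) v)
      | none => nt.insert rightState (rightMovement + c)) PySem.Dict.empty = pvStepA N digit tree := by
  have hbody : ∀ (nt : PySem.Dict (Int × Int) Int) (sc : (Int × Int) × Int),
      (let state := sc.1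
       let c := sc.2
       let leftState := (digit, state.2)
       let leftMovement := getMinimalPathLength N digit state.1
       let nt :=
         match nt.get? leftState with
         | some v => nt.insert leftState (min (c + leftMovement) v)
         | none => nt.insert leftState (leftMovement + c)
       let rightState := (state.1, digit)
       let rightMovement := getMinimalPathLength N digit state.2
       match nt.get? rightState with
       | some v => nt.insert rightState (min (c + rightMovement) v)
       | none => nt.insert rightState (rightMovement + c)) =
      pvMinIns (pvMinIns nt (digit, sc.1.2) (sc.2 + getMinimalPathLength N digit sc.1.1))
        (sc.1.1, digit) (sc.2 + getMinimalPathLength N digit sc.1.2) := by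
    intro nt sc
    simp only []
    have e1 : (match nt.get? (digit, sc.1.2) with
        | some v => nt.insert (digit, sc.1.2) (min (sc.2 + getMinimalPathLength N digit sc.1.1) v)
        | none => nt.insert (digit, sc.1.2) (getMinimalPathLength N digit sc.1.1 + sc.2)) =
        pvMinIns nt (digit, sc.1.2) (sc.2 + getMinimalPathLength N digit sc.1.1) := by
      unfold pvMinIns
      cases nt.get? (digit, sc.1.2) <;> simp [add_comm]
    rw [e1]
    generalize pvMinIns nt (digit, sc.1.2) (sc.2 + getMinimalPathLength N digit sc.1.1) = nt1
    unfold pvMinIns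
    cases nt1.get? (sc.1.1, digit) <;> simp [add_comm]
  rw [PySem.List.foldl_congr_mem _ _ _ _ (fun acc x _ => hbody acc x),
    show tree.items.foldl (fun d x => pvMinIns
        (pvMinIns d (digit, x.1.2) (x.2 + getMinimalPathLength N digit x.1.1))
        (x.1.1, digit) (x.2 + getMinimalPathLength N digit x.1.2)) PySem.Dict.empty =
      pvFMI2 tree.items (fun sc => (digit, sc.1.2)) (fun sc => (sc.1.1, digit))
        (fun sc => sc.2 + getMinimalPathLength N digit sc.1.1)
        (fun sc => sc.2 + getMinimalPathLength N digit sc.1.2) PySem.Dict.empty from rfl,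
    pvFoldlTwo]
  rfl

-- ----- B-side: the backward rows compute pvG -----

theorem pvRowsB (N : Int) (rest : List Int) :
    ∀ (c0 : Int) (Q : List Int),
      ((c0 :: rest).zip rest).foldr (fun pdd g => pvStepRow N g pdd)
          ((Q ++ (c0 :: rest).dropLast).map (fun p => (p, (0 : Int)))) =
        Q.map (fun p => (p, pvG N c0 p rest)) := by
  induction rest with
  | nil =>
    intro c0 Q
    simp [pvG]
  | cons d rest ih =>
    intro c0 Q
    have hzip : ((c0 :: d :: rest).zip (d :: rest)) = (c0, d) :: ((d :: rest).zip rest) := rfl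
    rw [hzip, List.foldr_cons]
    have hdl : (c0 :: d :: rest).dropLast = c0 :: (d :: rest).dropLast := rfl
    rw [hdl, show Q ++ c0 :: (d :: rest).dropLast = (Q ++ [c0]) ++ (d :: rest).dropLast by simp,
      ih d (Q ++ [c0])]
    rw [show (Q ++ [c0]).map (fun p => (p, pvG N d p rest)) =
      Q.map (fun p => (p, pvG N d p rest)) ++ [(c0, pvG N d c0 rest)] by simp]
    unfold pvStepRow
    simp only [PySem.List.pyGet?_neg_one_append_singleton, Option.getD_some,
      PySem.List.slice_to_neg_one, List.dropLast_concat, List.map_map]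
    refine List.map_congr_left (fun p _ => ?_)
    simp only [Function.comp, pvG]

theorem pvAltB (N M c0 : Int) (rest : List Int) :
    getMinCodeEntryTime_alt N M (c0 :: rest) =
      getMinimalPathLength N 1 c0 + pvG N c0 1 rest := by
  unfold getMinCodeEntryTime_alt
  simp only [PySem.List.slice_to_neg_one, PySem.List.slice_from_one, List.foldl_reverse,
    List.tail_cons]
  rw [show ((1 : Int) :: (c0 :: rest).dropLast).map (fun p => (p, (0 : Int))) =
    ([1] ++ (c0 :: rest).dropLast).map (fun p => (p, (0 : Int))) from rfl]
  rw [show ∀ g0, ((c0 :: rest).zip rest).foldr (fun x y => pvStepRow N y x) g0 =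
    ((c0 :: rest).zip rest).foldr (fun pdd g => pvStepRow N g pdd) g0 from fun _ => rfl]
  rw [pvRowsB N rest c0 [1]]
  simp [PySem.List.pyGet?, PySem.List.pyIdx?]

-- ===== VERDICT (by name: the statement is the Claim_ definition above) =====
theorem getMinCodeEntryTime_spec : Claim_equal_getMinCodeEntryTime := by
  intro N M C _ hpre
  unfold Spec_getMinCodeEntryTime
  match C with
  | [] => exact absurd rfl hpre
  | c0 :: rest =>
    rw [pvAltB]
    unfold getMinCodeEntryTime
    simp only []
    rw [PySem.List.foldl_congr_mem _ _ _ _ (fun acc x _ => pvBodyA N x acc)]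
    have hshape0 : pvShape c0 (PySem.Dict.empty.insert (c0, 1) (getMinimalPathLength N c0 1)) := by
      refine ⟨PySem.Dict.nodup_keys_insert _ _ _ PySem.Dict.nodup_keys_empty, ?_⟩
      intro k hk
      rw [PySem.Dict.get?_insert, PySem.Dict.get?_empty] at hk
      by_cases h : k = (c0, 1)
      · subst h; left; rfl
      · rw [if_neg h] at hk; exact absurd rfl hk
    have hvals : ∀ T : PySem.Dict (Int × Int) Int,
        PySem.List.min? T.values (fun x => x) = pvMinW (fun kc : (Int × Int) × Int => kc.2) T.items := by
      intro T
      rw [pvMin?_eq_pvMinW, PySem.Dict.values, pvMinW_map]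
    rw [hvals, pvLoopW N rest c0 _ hshape0]
    simp [PySem.Dict.empty, PySem.Dict.insert, PySem.Dict.contains, pvMinW, pvOmin,
      pvOth_fst, pvDist_symm N c0 1]
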